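-- pv_equiv track=rewrite | github.com/snapADDY/ptypysql | ptypysql/utils.py | extract_outer_subquery
-- ===== SOURCE A (Python) =====
-- def extract_outer_subquery(s):
--     "Extract outer subquery in query `s`"
--     # initialize container for subquery positions
--     # in string `s`
--     subquery_pos = []
--     # auxiliar indicator to get the subquery right
--     ind = True
--     # counter for parenthesis
--     k = 0
--     # loop over string characters
--     for i, c in enumerate(s):
--         if s[i : (i + 8)] in {"(\nSELECT", "(\nWHERE "} and ind:  # query start
--             subquery_pos.append(i)
--             k = 0  # set the parenthesis counter to 0
--             # turn off the indicator for the program to know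
--             # that we already hit the subquery start
--             ind = False
--         elif c == "(":  # if there is a parenthesis not involving a subquery
--             k += 1
--         elif c == ")" and k == 0 and not ind:  # end position for subquery
--             subquery_pos.append(i)
--             return subquery_pos
--         elif c == ")":
--             k -= 1
-- ===== SOURCE B (Python) =====
-- def extract_outer_subquery(s):
--     "Extract outer subquery in query `s`"
--     # prefix parenthesis depths: depth[j] = #'(' minus #')' in s[:j]
--     depth = [0]
--     bal = 0
--     for c in s:
--         bal += (c == "(") - (c == ")")
--         depth.append(bal)
--     # earliest marker position
--     start = next((i for i in range(len(s))
--                   if s.startswith(("(\nSELECT", "(\nWHERE "), i)), None)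
--     if start is None:
--         return None
--     # matching close: first position where the depth drops below depth[start + 1]
--     target = depth[start + 1] - 1
--     end = next((i for i in range(start + 1, len(s)) if depth[i + 1] == target), None)
--     return None if end is None else [start, end]
-- ===== Notes on version B (the rewrite author's own statement) =====
-- stated objective: alternative
-- what changed: A's single stateful scan (ind flag + live parenthesis counter with early return) is replaced by precomputing a prefix-depth array for the whole string, locating the earliest marker with a generator over startswith, and then selecting the end as the first index whose prefix depth drops below the depth just after the marker - no running counter, the balance logic becomes a pure lookup in precomputed data.
import Mathlib
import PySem

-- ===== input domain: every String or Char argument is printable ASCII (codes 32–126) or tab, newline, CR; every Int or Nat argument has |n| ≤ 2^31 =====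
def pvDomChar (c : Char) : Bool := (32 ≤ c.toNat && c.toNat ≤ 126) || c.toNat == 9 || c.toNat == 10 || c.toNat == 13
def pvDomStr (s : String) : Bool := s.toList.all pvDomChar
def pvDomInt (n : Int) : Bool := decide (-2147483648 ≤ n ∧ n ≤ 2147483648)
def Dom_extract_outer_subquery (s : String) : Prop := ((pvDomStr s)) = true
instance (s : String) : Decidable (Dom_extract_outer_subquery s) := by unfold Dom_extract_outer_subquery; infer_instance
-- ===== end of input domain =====

-- B replaces A's single stateful scan (ind flag + live parenthesis counter) by a precomputed
-- prefix-depth array: the end index is the first position whose depth drops below the depth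
-- just after the earliest marker (alternative decomposition, same asymptotic cost).

-- ===== PORT A =====
def pvMark1 : List Char := "(\nSELECT".toList
def pvMark2 : List Char := "(\nWHERE ".toList

-- A's for-loop: index i, remaining characters, subquery_pos, ind, k
def pvALoop (cs : List Char) : Nat → List Char → List Int → Bool → Int → Option (List Int)
  | _, [], _, _, _ => none
  | i, c :: rest, pos, ind, k =>
    if (PySem.List.slice cs (some (i : Int)) (some ((i : Int) + 8)) = pvMark1 ∨
        PySem.List.slice cs (some (i : Int)) (some ((i : Int) + 8)) = pvMark2) ∧ ind = true then
      pvALoop cs (i + 1) rest (pos ++ [(i : Int)]) false 0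
    else if c = '(' then
      pvALoop cs (i + 1) rest pos ind (k + 1)
    else if c = ')' ∧ k = 0 ∧ ind = false then
      some (pos ++ [(i : Int)])
    else if c = ')' then
      pvALoop cs (i + 1) rest pos ind (k - 1)
    else
      pvALoop cs (i + 1) rest pos ind k

def extract_outer_subquery (s : String) : Option (List Int) :=
  pvALoop s.toList 0 s.toList [] true 0

-- ===== PORT B =====
-- depth = [0]; bal = 0; for c in s: bal += (c=='(')-(c==')'); depth.append(bal)
def pvDepthAux : List Char → Int → List Int
  | [], _ => []
  | c :: rest, bal =>
    let b := bal + (if c = '(' then 1 else 0) - (if c = ')' then 1 else 0)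
    b :: pvDepthAux rest b

def pvDepth (cs : List Char) : List Int := 0 :: pvDepthAux cs 0

-- s.startswith(("(\nSELECT", "(\nWHERE "), i) — exact for the 0 ≤ i produced by range(len(s))
def pvHitB (cs : List Char) (i : Int) : Bool :=
  decide (pvMark1 <+: cs.drop i.toNat) || decide (pvMark2 <+: cs.drop i.toNat)

def extract_outer_subquery_alt (s : String) : Option (List Int) :=
  let cs := s.toList
  let depth := pvDepth cs
  -- start = next((i for i in range(len(s)) if s.startswith(..., i)), None)
  match (PySem.List.pyRange 0 cs.length 1).find? (pvHitB cs) with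
  | none => none
  | some start =>
    -- depth[start+1] / depth[i+1]: indices always in range, so pyGetD with default 0 is exact
    let target := PySem.List.pyGetD depth (start + 1) 0 - 1
    match (PySem.List.pyRange (start + 1) cs.length 1).find?
        (fun i => PySem.List.pyGetD depth (i + 1) 0 == target) with
    | none => none
    | some e => some [start, e]

-- ===== PRECONDITION & SPEC =====
-- A returns normally on every string (it is total), so Pre_ is trivially true and excludes nothing.
def Pre_extract_outer_subquery (s : String) : Prop := True
-- (A yields a position pair on marker inputs such as "(\nSELECT a)" and none on plain text such as "ab")
instance (s : String) : Decidable (Pre_extract_outer_subquery s) := by unfold Pre_extract_outer_subquery; infer_instance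
def pvWitness_extract_outer_subquery : String := "(\nSELECT a)"

def Spec_extract_outer_subquery (s : String) (out : Option (List Int)) : Prop := out = extract_outer_subquery_alt s
instance (s : String) (out : Option (List Int)) : Decidable (Spec_extract_outer_subquery s out) := by unfold Spec_extract_outer_subquery; infer_instance

-- ===== CLAIM =====
def Claim_equal_extract_outer_subquery : Prop := ∀ (s : String), Dom_extract_outer_subquery s → Pre_extract_outer_subquery s → Spec_extract_outer_subquery s (extract_outer_subquery s)

-- ===== LEMMAS AND PROOFS =====

-- per-character contribution to the parenthesis balance
def pvChv (c : Char) : Int := (if c = '(' then 1 else 0) - (if c = ')' then 1 else 0)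

-- depth of the prefix s[:i]
def pvD (cs : List Char) (i : Nat) : Int := ((cs.take i).map pvChv).sum

-- "a marker starts at position i of cs"
def pvHit (cs : List Char) (i : Nat) : Prop := pvMark1 <+: cs.drop i ∨ pvMark2 <+: cs.drop i

theorem pvSlice_hit (cs : List Char) (i : Nat) :
    ((PySem.List.slice cs (some (i : Int)) (some ((i : Int) + 8)) = pvMark1 ∨
      PySem.List.slice cs (some (i : Int)) (some ((i : Int) + 8)) = pvMark2) ↔ pvHit cs i) := by
  have h8 : ((i : Int) + 8) = ((i : Int) + ((8 : Nat) : Int)) := by norm_num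
  rw [h8, PySem.List.slice_natCast_add]
  have hm1 : pvMark1.length = 8 := by decide
  have hm2 : pvMark2.length = 8 := by decide
  constructor
  · rintro (h | h)
    · left; rw [List.prefix_iff_eq_take, hm1, h]
    · right; rw [List.prefix_iff_eq_take, hm2, h]
  · rintro (h | h)
    · left; rw [List.prefix_iff_eq_take, hm1] at h; exact h.symm
    · right; rw [List.prefix_iff_eq_take, hm2] at h; exact h.symm

theorem pvHit_lt (cs : List Char) (i : Nat) (h : pvHit cs i) : i + 8 ≤ cs.length := by
  have h1 : pvMark1.length = 8 := by decide
  have h2 : pvMark2.length = 8 := by decide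
  rcases h with h | h
  · have hle := h.length_le
    rw [h1, List.length_drop] at hle
    omega
  · have hle := h.length_le
    rw [h2, List.length_drop] at hle
    omega

-- if no marker occurs anywhere, A's loop (with ind still on) returns none
theorem pvPhase1_none (cs : List Char) (h : ∀ i, ¬ pvHit cs i) :
    ∀ (rest : List Char) (i : Nat) (pos : List Int) (k : Int),
      rest = cs.drop i → pvALoop cs i rest pos true k = none := by
  intro rest
  induction rest with
  | nil => intro i pos k _; rfl
  | cons c rest ih =>
    intro i pos k hdrop
    have hnext : rest = cs.drop (i + 1) := by
      rw [← List.tail_drop, ← hdrop]; rfl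
    rw [pvALoop]
    have hno : ¬ ((PySem.List.slice cs (some (i : Int)) (some ((i : Int) + 8)) = pvMark1 ∨
        PySem.List.slice cs (some (i : Int)) (some ((i : Int) + 8)) = pvMark2)) := by
      rw [pvSlice_hit]; exact h i
    rw [if_neg (by tauto)]
    by_cases hc : c = '('
    · simp [hc, ih _ pos _ hnext]
    · by_cases hc2 : c = ')'
      · simp [hc2, ih _ pos _ hnext]
      · simp [hc, hc2, ih _ pos _ hnext]

-- A's loop skips up to the first marker position j, then turns ind off
theorem pvPhase1_skip (cs : List Char) (j : Nat) (hj : pvHit cs j)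
    (hmin : ∀ i' < j, ¬ pvHit cs i') :
    ∀ (n i : Nat), i + n = j → ∀ (pos : List Int) (k : Int),
      pvALoop cs i (cs.drop i) pos true k =
        pvALoop cs (j + 1) (cs.drop (j + 1)) (pos ++ [(j : Int)]) false 0 := by
  intro n
  induction n with
  | zero =>
    intro i hij pos k
    have hi : i = j := by omega
    subst hi
    have hlt : i < cs.length := by have := pvHit_lt cs i hj; omega
    rw [List.drop_eq_getElem_cons hlt, pvALoop,
      if_pos ⟨(pvSlice_hit cs i).mpr hj, rfl⟩]
  | succ n ih =>
    intro i hij pos k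
    have hij' : i < j := by omega
    have hjlt : j < cs.length := by have := pvHit_lt cs j hj; omega
    have hlt : i < cs.length := by omega
    rw [List.drop_eq_getElem_cons hlt, pvALoop]
    have hno : ¬ ((PySem.List.slice cs (some (i : Int)) (some ((i : Int) + 8)) = pvMark1 ∨
        PySem.List.slice cs (some (i : Int)) (some ((i : Int) + 8)) = pvMark2)) := by
      rw [pvSlice_hit]; exact hmin i hij'
    rw [if_neg (by tauto)]
    have ihc := ih (i + 1) (by omega) pos
    by_cases hc : cs[i] = '('
    · simp [hc, ihc]
    · by_cases hc2 : cs[i] = ')'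
      · simp [hc2, ihc]
      · simp [hc, hc2, ihc]

-- pvD facts
theorem pvD_zero (cs : List Char) : pvD cs 0 = 0 := rfl

theorem pvD_succ (cs : List Char) (i : Nat) (h : i < cs.length) :
    pvD cs (i + 1) = pvD cs i + pvChv cs[i] := by
  have hm : i < (cs.map pvChv).length := by simpa using h
  unfold pvD
  rw [List.map_take, List.map_take, List.take_add_one, List.getElem?_eq_getElem hm]
  simp

-- the depth list is the table of pvD values
theorem pvDepthAux_eq (cs : List Char) : ∀ bal : Int,
    pvDepthAux cs bal = (List.range cs.length).map (fun j => bal + pvD cs (j + 1)) := by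
  induction cs with
  | nil => intro bal; rfl
  | cons c rest ih =>
    intro bal
    have hstep : ∀ j, pvD (c :: rest) (j + 1) = pvChv c + pvD rest j := by
      intro j
      unfold pvD
      simp [List.take_succ_cons, pvChv]
    rw [pvDepthAux]
    simp only [List.length_cons, List.range_succ_eq_map, List.map_cons, List.map_map]
    rw [List.cons_eq_cons]
    constructor
    · rw [hstep 0, pvD_zero]; unfold pvChv; ring
    · rw [ih]
      apply List.map_congr_left
      intro j _
      simp only [Function.comp_apply, hstep (j + 1)]
      unfold pvChv
      ring

theorem pvDepth_eq (cs : List Char) :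
    pvDepth cs = (List.range (cs.length + 1)).map (fun j => pvD cs j) := by
  rw [pvDepth, pvDepthAux_eq]
  simp [List.range_succ_eq_map, List.map_map, pvD_zero, Function.comp]

theorem pvDepth_getD (cs : List Char) (i : Int) (h0 : 0 ≤ i) (h : i ≤ cs.length) :
    PySem.List.pyGetD (pvDepth cs) i 0 = pvD cs i.toNat := by
  have hlen : (pvDepth cs).length = cs.length + 1 := by
    rw [pvDepth_eq]; simp
  have h1 : (pvDepth cs)[i.toNat]? = some (pvD cs i.toNat) := by
    rw [pvDepth_eq, List.getElem?_map, List.getElem?_range (by omega)]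
    rfl
  rw [PySem.List.pyGetD_eq_getElem _ _ h0 (by rw [hlen]; push_cast; omega)]
  rw [List.getElem_eq_iff]
  exact h1

-- find? over a step-1 range: the some case gives bounds, the predicate, and minimality
theorem pvFindRangeSome (p : Int → Bool) : ∀ (n : Nat) (a b x : Int), (b - a).toNat = n →
    (PySem.List.pyRange a b 1).find? p = some x →
    a ≤ x ∧ x < b ∧ p x = true ∧ ∀ y, a ≤ y → y < x → p y = false := by
  intro n
  induction n with
  | zero =>
    intro a b x hn hf
    rw [PySem.List.pyRange_one_eq_nil (by omega)] at hf
    simp at hf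
  | succ n ih =>
    intro a b x hn hf
    rw [PySem.List.pyRange_one_cons (by omega)] at hf
    by_cases hpa : p a
    · rw [List.find?_cons_of_pos hpa] at hf
      cases hf
      exact ⟨le_refl _, by omega, hpa, fun y h1 h2 => by omega⟩
    · rw [List.find?_cons_of_neg hpa] at hf
      obtain ⟨h1, h2, h3, h4⟩ := ih (a + 1) b x (by omega) hf
      refine ⟨by omega, h2, h3, fun y hy1 hy2 => ?_⟩
      by_cases hya : y = a
      · subst hya; simpa using hpa
      · exact h4 y (by omega) hy2
    
theorem pvFindRangeNone (p : Int → Bool) (a b : Int)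
    (h : (PySem.List.pyRange a b 1).find? p = none) :
    ∀ x, a ≤ x → x < b → p x = false := by
  intro x h1 h2
  rw [List.find?_eq_none] at h
  simpa using h x (by rw [PySem.List.mem_pyRange_one]; exact ⟨h1, h2⟩)

theorem pvFindCongr {α : Type} (p q : α → Bool) :
    ∀ l : List α, (∀ x ∈ l, p x = q x) → l.find? p = l.find? q := by
  intro l
  induction l with
  | nil => intro _; rfl
  | cons c rest ih =>
    intro h
    rw [List.find?_cons, List.find?_cons, h c (by simp)]
    split
    · rfl
    · exact ih (fun x hx => h x (by simp [hx]))

-- phase-2: once ind is off, A's counter loop returns the first j ≥ i with pvD (j+1) = target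
theorem pvPhase2 (cs : List Char) (start target : Int) :
    ∀ (rest : List Char) (i : Nat) (k : Int), rest = cs.drop i → i ≤ cs.length → 0 ≤ k →
      pvD cs i = target + 1 + k →
      pvALoop cs i rest [start] false k =
        (match (PySem.List.pyRange (i : Int) cs.length 1).find?
            (fun j => pvD cs (j + 1).toNat == target) with
         | none => none
         | some e => some [start, e]) := by
  intro rest
  induction rest generalizing start with
  | nil =>
    intro i k hdrop hle hk hD
    have hi : cs.length ≤ i := by
      have := congrArg List.length hdrop
      simp at this
      omega
    rw [PySem.List.pyRange_one_eq_nil (by omega)]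
    rfl
  | cons c rest ih =>
    intro i k hdrop hle hk hD
    have hlt : i < cs.length := by
      by_contra hge
      rw [List.drop_eq_nil_of_le (by omega)] at hdrop
      exact absurd hdrop (by simp)
    have hc : c = cs[i] := by
      rw [List.drop_eq_getElem_cons hlt] at hdrop
      exact (List.cons_eq_cons.mp hdrop).1
    have hnext : rest = cs.drop (i + 1) := by
      rw [List.drop_eq_getElem_cons hlt] at hdrop
      exact (List.cons_eq_cons.mp hdrop).2
    have hDs : pvD cs (i + 1) = pvD cs i + pvChv cs[i] := pvD_succ cs i hlt
    have hrange : PySem.List.pyRange (i : Int) cs.length 1 =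
        (i : Int) :: PySem.List.pyRange ((i : Int) + 1) cs.length 1 :=
      PySem.List.pyRange_one_cons (by omega)
    have hcast1 : ((i : Int) + 1).toNat = i + 1 := by omega
    have hcast2 : ((i + 1 : Nat) : Int) = ((i : Int) + 1) := by omega
    rw [hrange, pvALoop]
    simp only [and_false, Bool.false_eq_true, if_false]
    by_cases hpo : c = '('
    · have hv : pvChv cs[i] = 1 := by rw [← hc, hpo]; rfl
      have hne : ¬ ((pvD cs (((i : Int)) + 1).toNat == target) = true) := by
        rw [hcast1, hDs, hv]; simp only [beq_iff_eq]; omega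
      have hih := ih start (i + 1) (k + 1) hnext (by omega) (by omega) (by omega)
      rw [hcast2] at hih
      rw [List.find?_cons_of_neg (p := fun j => pvD cs (j + 1).toNat == target)
        (a := ((i : Nat) : Int)) (by simpa using hne)]
      rw [if_pos hpo]
      exact hih
    · by_cases hpc : c = ')'
      · have hv : pvChv cs[i] = -1 := by rw [← hc, hpc]; rfl
        by_cases hk0 : k = 0
        · have heq : (pvD cs (((i : Int)) + 1).toNat == target) = true := by
            rw [hcast1, hDs, hv]; simp only [beq_iff_eq]; omega
          rw [List.find?_cons_of_pos (p := fun j => pvD cs (j + 1).toNat == target)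
            (a := ((i : Nat) : Int)) (by simpa using heq)]
          rw [if_neg hpo, if_pos ⟨hpc, hk0, trivial⟩]
          rfl
        · have hne : ¬ ((pvD cs (((i : Int)) + 1).toNat == target) = true) := by
            rw [hcast1, hDs, hv]; simp only [beq_iff_eq]; omega
          have hih := ih start (i + 1) (k - 1) hnext (by omega) (by omega) (by omega)
          rw [hcast2] at hih
          rw [List.find?_cons_of_neg (p := fun j => pvD cs (j + 1).toNat == target)
            (a := ((i : Nat) : Int)) (by simpa using hne)]
          rw [if_neg hpo, if_neg (by simp [hk0]), if_pos hpc]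
          exact hih
      · have hv : pvChv cs[i] = 0 := by
          rw [← hc]; unfold pvChv; simp [hpo, hpc]
        have hne : ¬ ((pvD cs (((i : Int)) + 1).toNat == target) = true) := by
          rw [hcast1, hDs, hv]; simp only [beq_iff_eq]; omega
        have hih := ih start (i + 1) k hnext (by omega) (by omega) (by omega)
        rw [hcast2] at hih
        rw [List.find?_cons_of_neg (p := fun j => pvD cs (j + 1).toNat == target)
          (a := ((i : Nat) : Int)) (by simpa using hne)]
        rw [if_neg hpo, if_neg (fun h => hpc h.1), if_neg hpc]
        exact hih

-- ===== VERDICT =====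
theorem extract_outer_subquery_spec : Claim_equal_extract_outer_subquery := by
  intro s _ _
  unfold Spec_extract_outer_subquery extract_outer_subquery extract_outer_subquery_alt
  dsimp only
  cases hf : (PySem.List.pyRange 0 (s.toList.length) 1).find? (pvHitB s.toList) with
  | none =>
    have hno : ∀ i, ¬ pvHit s.toList i := by
      intro i hi
      have hilt : i < s.toList.length := by have := pvHit_lt s.toList i hi; omega
      have := pvFindRangeNone _ _ _ hf (i : Int) (by omega) (by omega)
      rw [pvHitB] at this
      rcases hi with h | h <;> simp [Int.toNat_natCast, h] at this
    rw [pvPhase1_none s.toList hno s.toList 0 [] 0 (by simp)]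
  | some start =>
    obtain ⟨hs0, hslt, hsp, hsmin⟩ := pvFindRangeSome (pvHitB s.toList) _ 0 _ start rfl hf
    have hslt' : start.toNat < s.toList.length := by omega
    have hj : pvHit s.toList start.toNat := by
      rw [pvHitB] at hsp
      rcases Bool.or_eq_true_iff.mp hsp with h | h
      · exact Or.inl (of_decide_eq_true h)
      · exact Or.inr (of_decide_eq_true h)
    have hmin : ∀ i' < start.toNat, ¬ pvHit s.toList i' := by
      intro i' hi' hhit
      have := hsmin (i' : Int) (by omega) (by omega)
      rw [pvHitB] at this
      rcases hhit with h | h <;> simp [Int.toNat_natCast, h] at this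
    have hA := pvPhase1_skip s.toList start.toNat hj hmin start.toNat 0 (by omega) [] 0
    rw [List.drop_zero, List.nil_append] at hA
    have hcast : ((start.toNat : Nat) : Int) = start := by omega
    rw [hcast] at hA
    rw [hA]
    -- the target: depth[start+1] - 1 = pvD (start.toNat+1) - 1
    have htgt : PySem.List.pyGetD (pvDepth s.toList) (start + 1) 0 =
        pvD s.toList (start.toNat + 1) := by
      rw [pvDepth_getD s.toList (start + 1) (by omega) (by omega)]
      congr 1
      omega
    -- B's predicate agrees with the pvD predicate on the searched range
    have hcongr : (PySem.List.pyRange (start + 1) (s.toList.length) 1).find?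
          (fun i => PySem.List.pyGetD (pvDepth s.toList) (i + 1) 0 ==
            PySem.List.pyGetD (pvDepth s.toList) (start + 1) 0 - 1) =
        (PySem.List.pyRange (start + 1) (s.toList.length) 1).find?
          (fun j => pvD s.toList (j + 1).toNat == pvD s.toList (start.toNat + 1) - 1) := by
      apply pvFindCongr
      intro x hx
      rw [PySem.List.mem_pyRange_one] at hx
      rw [pvDepth_getD s.toList (x + 1) (by omega) (by omega), htgt]
    have hcast2 : ((start.toNat + 1 : Nat) : Int) = start + 1 := by omega
    have hB := pvPhase2 s.toList start (pvD s.toList (start.toNat + 1) - 1)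
      (s.toList.drop (start.toNat + 1)) (start.toNat + 1) 0 rfl (by omega) (by omega) (by omega)
    rw [hcast2] at hB
    dsimp only
    rw [hB, ← hcongr]
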